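-- pv_equiv track=rewrite | github.com/jrmbchtl/WhoWolfBot | src/main/common/utils.py | get_decision
-- ===== SOURCE A (Python) =====
-- def get_decision(dic):
--     """calculates vote decision"""
--     choice_to_amount = {}
--     for key in dic:
--         if dic[key] not in choice_to_amount:
--             choice_to_amount[dic[key]] = 1
--         else:
--             choice_to_amount[dic[key]] += 1
--
--     maximum = 0
--     unique = True
--     for key in choice_to_amount:
--         if choice_to_amount[key] > maximum:
--             maximum = choice_to_amount[key]
--             unique = True
--         elif choice_to_amount[key] == maximum:
--             unique = False
--
--     if not unique:
--         return None
--
--     for key in choice_to_amount: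
--         if choice_to_amount[key] == maximum:
--             return key
--     return None
-- ===== SOURCE B (Python) =====
-- def get_decision(dic):
--     """calculates vote decision"""
--     counts = {}
--     for v in dic.values():
--         counts[v] = counts.get(v, 0) + 1
--     ranked = sorted(counts.items(), key=lambda kv: -kv[1])
--     if not ranked:
--         return None
--     if len(ranked) >= 2 and ranked[1][1] == ranked[0][1]:
--         return None
--     return ranked[0][0]
-- ===== Notes on version B (the rewrite author's own statement) =====
-- stated objective: idiomatic
-- what changed: Replaces A's interleaved max/uniqueness scan plus a separate winner-finding loop over the count dict by sorting the count items in descending count order once and inspecting the top two entries (tie at the top means None, else the top choice wins).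
import Mathlib
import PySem

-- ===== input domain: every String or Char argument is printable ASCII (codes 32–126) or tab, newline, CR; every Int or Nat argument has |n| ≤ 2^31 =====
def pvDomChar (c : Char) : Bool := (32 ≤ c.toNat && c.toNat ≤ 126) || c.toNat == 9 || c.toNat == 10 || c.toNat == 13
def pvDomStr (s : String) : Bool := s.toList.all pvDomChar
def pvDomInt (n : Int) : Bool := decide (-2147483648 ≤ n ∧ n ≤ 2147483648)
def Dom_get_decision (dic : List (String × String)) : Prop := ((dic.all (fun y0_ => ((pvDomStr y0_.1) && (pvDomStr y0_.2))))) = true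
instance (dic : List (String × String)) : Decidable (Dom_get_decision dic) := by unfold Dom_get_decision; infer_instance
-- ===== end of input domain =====

-- B replaces A's interleaved max/uniqueness scan plus separate winner loop by one
-- descending sort of the count items and an inspection of the top two entries (idiomatic).

-- ===== PORT A =====
def get_decision (dic : List (String × String)) : Option String :=
  let d := PySem.Dict.ofList dic
  let choice_to_amount : PySem.Dict String Int := d.keys.foldl (fun c k =>
      if c.contains (d.getD k "") = false then c.insert (d.getD k "") 1
      else c.modify (d.getD k "") 0 (· + 1)) PySem.Dict.empty
  let mu := choice_to_amount.keys.foldl (fun (p : Int × Bool) k =>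
      if p.1 < choice_to_amount.getD k 0 then (choice_to_amount.getD k 0, true)
      else if choice_to_amount.getD k 0 = p.1 then (p.1, false) else p) ((0 : Int), true)
  if mu.2 = false then none
  else choice_to_amount.keys.findSome? (fun k =>
      if choice_to_amount.getD k 0 = mu.1 then some k else none)

-- ===== PORT B =====
def get_decision_alt (dic : List (String × String)) : Option String :=
  let d := PySem.Dict.ofList dic
  let counts : PySem.Dict String Int := d.values.foldl (fun c v => c.insert v (c.getD v 0 + 1)) PySem.Dict.empty
  let ranked := PySem.List.sorted counts.items (fun kv => -kv.2) false
  match ranked with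
  | [] => none
  | (k, c) :: rest =>
    match rest with
    | [] => some k
    | (_, c2) :: _ => if c2 = c then none else some k

-- ===== PRECONDITION & SPEC =====
def Spec_get_decision (dic : List (String × String)) (out : Option String) : Prop := out = get_decision_alt dic
instance (dic : List (String × String)) (out : Option String) : Decidable (Spec_get_decision dic out) := by unfold Spec_get_decision; infer_instance

-- ===== CLAIM (what is proved, stated in full; the proofs are below) =====
def Claim_equal_get_decision : Prop := ∀ (dic : List (String × String)), Dom_get_decision dic → Spec_get_decision dic (get_decision dic)

-- ===== LEMMAS AND PROOFS =====

def pvMuStep (p : Int × Bool) (q : String × Int) : Int × Bool :=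
  if p.1 < q.2 then (q.2, true) else if q.2 = p.1 then (p.1, false) else p

theorem pv_mu_fold (cs : List (String × Int)) : ∀ (m : Int) (u : Bool),
    cs.foldl pvMuStep (m, u) =
      ((cs.map (·.2)).foldl max m,
       if m < (cs.map (·.2)).foldl max m then decide (List.count ((cs.map (·.2)).foldl max m) (cs.map (·.2)) = 1)
       else u && decide (List.count m (cs.map (·.2)) = 0)) := by
  induction cs with
  | nil => intro m u; simp
  | cons q cs ih =>
    intro m u
    have hle : ∀ (a : Int), a ≤ (cs.map (·.2)).foldl max a := fun a => (PySem.List.le_foldl_max _ a).1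
    by_cases h1 : m < q.2
    · have hstep : pvMuStep (m, u) q = (q.2, true) := by simp [pvMuStep, h1]
      have hmax : max m q.2 = q.2 := by omega
      simp only [List.foldl_cons, hstep, ih, List.map_cons, hmax]
      by_cases h2 : q.2 < (cs.map (·.2)).foldl max q.2
      · have hne : (cs.map (·.2)).foldl max q.2 ≠ q.2 := by omega
        simp [h2, List.count_cons, show m < (cs.map (·.2)).foldl max q.2 by omega]
        split <;> omega
      · have heq : (cs.map (·.2)).foldl max q.2 = q.2 := le_antisymm (by omega) (hle _)
        simp only [heq, List.count_cons]
        simp [h1]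
    · by_cases h2 : q.2 = m
      · have hstep : pvMuStep (m, u) q = (m, false) := by simp [pvMuStep, h2]
        have hmax : max m q.2 = m := by omega
        simp only [List.foldl_cons, hstep, ih, List.map_cons, hmax]
        by_cases h3 : m < (cs.map (·.2)).foldl max m
        · have hne : (cs.map (·.2)).foldl max m ≠ q.2 := by omega
          simp [h3, List.count_cons]
          split <;> omega
        · have heq : (cs.map (·.2)).foldl max m = m := le_antisymm (by omega) (hle _)
          simp [heq, h2]
      · have hstep : pvMuStep (m, u) q = (m, u) := by simp [pvMuStep, h1, h2]
        have hmax : max m q.2 = m := by omega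
        simp only [List.foldl_cons, hstep, ih, List.map_cons, hmax]
        by_cases h3 : m < (cs.map (·.2)).foldl max m
        · have hne : (cs.map (·.2)).foldl max m ≠ q.2 := by omega
          simp [h3, List.count_cons]
          split <;> omega
        · have heq : (cs.map (·.2)).foldl max m = m := le_antisymm (by omega) (hle _)
          simp [heq, h2]

def pvATail (cs : List (String × Int)) : Option String :=
  let mu := cs.foldl pvMuStep ((0 : Int), true)
  if mu.2 = false then none
  else cs.findSome? (fun q => if q.2 = mu.1 then some q.1 else none)

def pvBTail (cs : List (String × Int)) : Option String :=
  match PySem.List.sorted cs (fun kv => -kv.2) false with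
  | [] => none
  | (k, c) :: rest =>
    match rest with
    | [] => some k
    | (_, c2) :: _ => if c2 = c then none else some k

theorem pv_findSome?_of_filter_singleton (cs : List (String × Int)) (M : Int) (e : String × Int)
    (hf : cs.filter (fun q => q.2 == M) = [e]) :
    cs.findSome? (fun q => if q.2 = M then some q.1 else none) = some e.1 := by
  induction cs with
  | nil => simp at hf
  | cons x cs ih =>
    by_cases hx : x.2 = M
    · rw [List.filter_cons_of_pos (by simpa using hx)] at hf
      obtain ⟨h1, h2⟩ := List.cons_eq_cons.mp hf
      subst h1
      simp [List.findSome?, hx]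
    · rw [List.filter_cons_of_neg (by simpa using hx)] at hf
      simp [List.findSome?, hx, ih hf]

theorem pv_foldl_max_le (l : List Int) (a c : Int) (ha : a ≤ c) (h : ∀ x ∈ l, x ≤ c) :
    l.foldl max a ≤ c := by
  induction l generalizing a with
  | nil => simpa
  | cons x l ih =>
    simp only [List.foldl_cons]
    exact ih (max a x) (by have := h x (by simp); omega) (fun y hy => h y (by simp [hy]))

theorem pv_tail_eq (cs : List (String × Int)) (hpos : ∀ p ∈ cs, 1 ≤ p.2) :
    pvATail cs = pvBTail cs := by
  rcases hss : PySem.List.sorted cs (fun kv => -kv.2) false with _ | ⟨⟨k, c⟩, rest⟩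
  · -- cs = []
    have hnil : cs = [] := (PySem.List.sorted_eq_nil_iff cs _ false).mp hss
    subst hnil
    simp [pvATail, pvBTail, hss]
  · have hperm : ((⟨k, c⟩ :: rest : List (String × Int))).Perm cs := hss ▸ PySem.List.sorted_perm cs _ false
    have hmemkc : (⟨k, c⟩ : String × Int) ∈ cs := hperm.mem_iff.mp (by simp)
    have hub : ∀ y ∈ cs, y.2 ≤ c := by
      intro y hy
      have := PySem.List.key_head_sorted_le cs (fun kv => -kv.2) hss y hy
      simpa using this
    have hc1 : 1 ≤ c := hpos _ hmemkc
    -- max over vals is c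
    have hfoldc : (cs.map (·.2)).foldl max 0 = c := by
      have h1 := (PySem.List.le_foldl_max (cs.map (·.2)) 0).2 c (by exact List.mem_map.mpr ⟨_, hmemkc, rfl⟩)
      have h2 : (cs.map (·.2)).foldl max 0 ≤ c := pv_foldl_max_le _ 0 c (by omega)
        (by intro x hx; obtain ⟨y, hy, rfl⟩ := List.mem_map.mp hx; exact hub y hy)
      omega
    have hcount : List.count c (cs.map (·.2)) = List.count c (((⟨k, c⟩ :: rest : List (String × Int))).map (·.2)) :=
      (hperm.map (·.2)).count_eq c |>.symm
    have hmu := pv_mu_fold cs 0 true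
    rw [hfoldc] at hmu
    rw [if_pos (by omega)] at hmu
    rcases rest with _ | ⟨⟨k2, c2⟩, t⟩
    · -- singleton
      have hcs : cs = [⟨k, c⟩] := List.perm_singleton.mp hperm.symm
      subst hcs
      simp [pvATail, pvBTail, hss, pvMuStep, show (0:Int) < c by omega]
    · have hc2le : c2 ≤ c := hub (k2, c2) (hperm.subset (by simp))
      by_cases htie : c2 = c
      · -- tie: count ≥ 2, A returns none
        have : 2 ≤ List.count c (cs.map (·.2)) := by
          rw [hcount]; subst htie; simp
        rw [pvATail, hmu]
        simp only [pvBTail, hss, htie]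
        simp
        omega
      · -- unique winner
        have htail : ∀ y ∈ (⟨k2, c2⟩ :: t : List (String × Int)), y.2 ≤ c2 := by
          have hp := PySem.List.sorted_pairwise cs (fun kv => -kv.2)
          rw [hss] at hp
          intro y hy
          rcases List.mem_cons.mp hy with rfl | hy'
          · simp
          · have := (List.pairwise_cons.mp (List.pairwise_cons.mp hp).2).1 y hy'
            simpa using this
        have hcnt0 : List.count c ((⟨k2, c2⟩ :: t : List (String × Int)).map (·.2)) = 0 := by
          rw [List.count_eq_zero]
          intro hmem
          obtain ⟨y, hy, hy2⟩ := List.mem_map.mp hmem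
          have := htail y hy
          omega
        have hcnt1 : List.count c (cs.map (·.2)) = 1 := by
          simp only [List.map_cons] at hcnt0
          rw [hcount, List.map_cons, List.count_cons]
          simp [hcnt0]
        have hfilter : cs.filter (fun q => q.2 == c) = [⟨k, c⟩] := by
          have hlen : (cs.filter (fun q => q.2 == c)).length = 1 := by
            rw [← List.countP_eq_length_filter]
            have : List.count c (cs.map (·.2)) = cs.countP (fun q => q.2 == c) := by
              rw [List.count, List.countP_map]
              rfl
            omega
          have hmemf : (⟨k, c⟩ : String × Int) ∈ cs.filter (fun q => q.2 == c) :=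
            List.mem_filter.mpr ⟨hmemkc, by simp⟩
          rcases hf : cs.filter (fun q => q.2 == c) with _ | ⟨e, es⟩
          · rw [hf] at hmemf; simp at hmemf
          · rw [hf] at hlen hmemf
            simp at hlen
            subst hlen
            simp at hmemf
            rw [hf, ← hmemf]
        rw [pvATail, hmu]
        rw [if_neg (by simp [hcnt1])]
        simp only []
        rw [pv_findSome?_of_filter_singleton cs c ⟨k, c⟩ hfilter]
        simp [pvBTail, hss, htie]

theorem pv_step (c : PySem.Dict String Int) (v : String) :
    (if c.contains v = false then c.insert v 1 else c.modify v 0 (· + 1)) = c.modify v 0 (· + 1) := by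
  by_cases h : c.contains v
  · simp [h]
  · simp only [Bool.not_eq_true] at h
    simp [h, PySem.Dict.modify, PySem.Dict.getD_of_not_contains c 0 h]

theorem pv_counterA (vs : List String) :
    vs.foldl (fun c v => if c.contains v = false then c.insert v 1
        else c.modify v 0 (· + 1)) (PySem.Dict.empty : PySem.Dict String Int)
      = PySem.Dict.counter vs := by
  rw [PySem.Dict.counter_eq_foldl]
  simp only [pv_step]

theorem pv_counter_pos (vs : List String) :
    ∀ p ∈ (PySem.Dict.counter vs).items, 1 ≤ p.2 := by
  intro p hp
  rw [PySem.Dict.items_counter] at hp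
  obtain ⟨x, hx, rfl⟩ := List.mem_map.mp hp
  have : x ∈ vs := (PySem.Set.mem_ofList vs x).mp hx
  have h1 : 1 ≤ List.count x vs := List.one_le_count_iff.mpr this
  simpa using h1

theorem pv_main (dic : List (String × String)) : get_decision dic = get_decision_alt dic := by
  simp only [get_decision, get_decision_alt]
  have hvals : (PySem.Dict.ofList dic).keys.map (fun k => (PySem.Dict.ofList dic).getD k "")
      = (PySem.Dict.ofList dic).values := by
    conv_rhs => rw [show (PySem.Dict.ofList dic).values = (PySem.Dict.ofList dic).items.map (·.2) from rfl]
    rw [PySem.Dict.items_eq_map_keys _ (PySem.Dict.nodup_keys_ofList dic) ""]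
    simp
  -- counting loops
  have hA : (PySem.Dict.ofList dic).keys.foldl (fun c k =>
      if c.contains ((PySem.Dict.ofList dic).getD k "") = false then c.insert ((PySem.Dict.ofList dic).getD k "") 1
      else c.modify ((PySem.Dict.ofList dic).getD k "") 0 (· + 1)) (PySem.Dict.empty : PySem.Dict String Int)
      = PySem.Dict.counter ((PySem.Dict.ofList dic).values) := by
    rw [← hvals, ← pv_counterA, List.foldl_map]
  have hB : (PySem.Dict.ofList dic).values.foldl (fun c v => c.insert v (c.getD v 0 + 1))
      (PySem.Dict.empty : PySem.Dict String Int) = PySem.Dict.counter ((PySem.Dict.ofList dic).values) :=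
    PySem.Dict.foldl_insert_getD_add_one_eq_counter _
  rw [hA, hB]
  set cta := PySem.Dict.counter ((PySem.Dict.ofList dic).values) with hcta
  have hitems : cta.items = cta.keys.map (fun k => (k, cta.getD k 0)) :=
    PySem.Dict.items_eq_map_keys cta (hcta ▸ PySem.Dict.nodup_keys_counter _) 0
  have htail := pv_tail_eq cta.items (hcta ▸ pv_counter_pos _)
  unfold pvATail pvBTail at htail
  dsimp only [] at htail ⊢
  conv at htail => lhs; rw [hitems]
  rw [List.foldl_map, List.findSome?_map] at htail
  exact htail


-- ===== VERDICT (by name: the statement is the Claim_ definition above) =====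
theorem get_decision_spec : Claim_equal_get_decision := by
  intro dic _
  unfold Spec_get_decision
  exact pv_main dic
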